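-- pv_equiv track=rewrite | github.com/Robin329/Python3 | python_lab/1_1door/test_4_1.py | count_letter_number
-- ===== SOURCE A (Python) =====
-- def count_letter_number(string):
--     letter_count = 0
--     digit_count = 0
--     for ch in string:
--         if 'a' <= ch <= 'z' or 'A' <= ch <= 'Z':
--             letter_count += 1
--         elif '0' <= ch <= '9':
--             digit_count += 1
--     return letter_count, digit_count
-- ===== SOURCE B (Python) =====
-- def count_letter_number(string):
--     freq = {}
--     for ch in string:
--         freq[ch] = freq.get(ch, 0) + 1
--     letter_count = sum(c for ch, c in freq.items()
--                        if 'a' <= ch <= 'z' or 'A' <= ch <= 'Z')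
--     digit_count = sum(c for ch, c in freq.items() if '0' <= ch <= '9')
--     return letter_count, digit_count
-- ===== Notes on version B (the rewrite author's own statement) =====
-- stated objective: alternative
-- what changed: B first builds a character-frequency dictionary in one pass, then sums the counts over the distinct keys in the letter and digit ASCII ranges, instead of A's single stateful loop with two running counters and an elif chain.
import Mathlib
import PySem

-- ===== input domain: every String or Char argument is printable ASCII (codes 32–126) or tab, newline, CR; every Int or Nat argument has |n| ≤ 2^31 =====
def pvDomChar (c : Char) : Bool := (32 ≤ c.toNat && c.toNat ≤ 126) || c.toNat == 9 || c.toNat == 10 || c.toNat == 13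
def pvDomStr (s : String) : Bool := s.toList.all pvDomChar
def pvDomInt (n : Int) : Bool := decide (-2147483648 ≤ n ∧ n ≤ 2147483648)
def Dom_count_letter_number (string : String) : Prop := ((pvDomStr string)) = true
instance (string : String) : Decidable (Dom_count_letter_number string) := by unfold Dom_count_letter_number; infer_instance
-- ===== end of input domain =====

-- B builds a character-frequency dict in one pass, then sums counts over the distinct
-- keys in the letter / digit ASCII ranges, instead of A's single loop with two counters.
-- ===== PORT A =====
def count_letter_number (string : String) : Int × Int :=
  string.toList.foldl
    (fun (s : Int × Int) ch =>
      if ('a' ≤ ch ∧ ch ≤ 'z') ∨ ('A' ≤ ch ∧ ch ≤ 'Z') then (s.1 + 1, s.2)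
      else if '0' ≤ ch ∧ ch ≤ '9' then (s.1, s.2 + 1)
      else s)
    ((0 : Int), (0 : Int))

-- ===== PORT B =====
def count_letter_number_alt (string : String) : Int × Int :=
  let freq : PySem.Dict Char Int :=
    string.toList.foldl (fun d ch => d.insert ch (d.getD ch 0 + 1)) PySem.Dict.empty
  let letter_count :=
    ((freq.items.filter (fun kv => decide (('a' ≤ kv.1 ∧ kv.1 ≤ 'z') ∨ ('A' ≤ kv.1 ∧ kv.1 ≤ 'Z')))).map (fun kv => kv.2)).sum
  let digit_count :=
    ((freq.items.filter (fun kv => decide ('0' ≤ kv.1 ∧ kv.1 ≤ '9'))).map (fun kv => kv.2)).sum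
  (letter_count, digit_count)

-- ===== PRECONDITION & SPEC =====
def Spec_count_letter_number (string : String) (out : Int × Int) : Prop := out = count_letter_number_alt string
instance (string : String) (out : Int × Int) : Decidable (Spec_count_letter_number string out) := by unfold Spec_count_letter_number; infer_instance

-- ===== CLAIM (what is proved, stated in full; the proofs are below) =====
def Claim_equal_count_letter_number : Prop := ∀ (string : String), Dom_count_letter_number string → Spec_count_letter_number string (count_letter_number string)

-- ===== LEMMAS AND PROOFS =====

-- ===== VERDICT (by name: the statement is the Claim_ definition above) =====
-- Bool versions of the two range tests, for the proofs.
def pvL (ch : Char) : Bool := decide (('a' ≤ ch ∧ ch ≤ 'z') ∨ ('A' ≤ ch ∧ ch ≤ 'Z'))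
def pvD (ch : Char) : Bool := decide ('0' ≤ ch ∧ ch ≤ '9')

lemma pvD_not_pvL (ch : Char) (h : pvD ch = true) : pvL ch = false := by
  simp [pvL, pvD, Char.le_def, UInt32.le_iff_toNat_le] at *
  omega

-- A's loop computes the two countP's.
lemma foldA (t : List Char) : ∀ a b : Int,
    t.foldl
      (fun (s : Int × Int) ch =>
        if ('a' ≤ ch ∧ ch ≤ 'z') ∨ ('A' ≤ ch ∧ ch ≤ 'Z') then (s.1 + 1, s.2)
        else if '0' ≤ ch ∧ ch ≤ '9' then (s.1, s.2 + 1)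
        else s) (a, b)
    = (a + (t.countP pvL : Int), b + (t.countP pvD : Int)) := by
  induction t with
  | nil => intro a b; simp
  | cons x t ih =>
    intro a b
    simp only [List.foldl_cons, List.countP_cons]
    by_cases hl : ('a' ≤ x ∧ x ≤ 'z') ∨ ('A' ≤ x ∧ x ≤ 'Z')
    · have hL : pvL x = true := by simp [pvL, hl]
      have hD : pvD x = false := by
        by_contra h
        have := pvD_not_pvL x (by simpa using Bool.of_not_eq_false h)
        simp [this] at hL
      simp [hl, ih, hL, hD]
      ring
    · have hL : pvL x = false := by simp [pvL, hl]
      by_cases hd : '0' ≤ x ∧ x ≤ '9'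
      · have hD : pvD x = true := by simp [pvD, hd]
        simp [hl, hd, ih, hL, hD]
        ring
      · have hD : pvD x = false := by simp [pvD, hd]
        simp [hl, hd, ih, hL, hD]

lemma sum_indicator (l : List Char) (x : Char) :
    (l.map (fun k => if k == x then (1 : Int) else 0)).sum = (l.count x : Int) := by
  induction l with
  | nil => simp
  | cons y t ih =>
    simp only [List.map_cons, List.sum_cons, List.count_cons, ih]
    by_cases h : y = x
    · simp [h]; ring
    · simp [h]

-- Summing each key's multiplicity over a nodup superset of keys, restricted to p, is countP p.
lemma key_sum (p : Char → Bool) (d : List Char) (hd : d.Nodup) :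
    ∀ xs : List Char, (∀ x ∈ xs, x ∈ d) →
      ((d.filter p).map (fun k => (xs.count k : Int))).sum = (xs.countP p : Int) := by
  intro xs
  induction xs with
  | nil => intro _; simp
  | cons x t ih =>
    intro hsub
    have hxd : x ∈ d := hsub x (List.mem_cons_self)
    have hrec := ih (fun y hy => hsub y (List.mem_cons_of_mem _ hy))
    have hstep : ((d.filter p).map (fun k => ((x :: t).count k : Int))).sum
        = ((d.filter p).map (fun k => (t.count k : Int))).sum
          + ((d.filter p).map (fun k => if k == x then (1 : Int) else 0)).sum := by
      rw [← List.sum_map_add]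
      apply congrArg
      apply List.map_congr_left
      intro k _
      push_cast [List.count_cons]
      by_cases h : k = x
      · simp [h]
      · simp [h, Ne.symm h]
    have hcnt : ((d.filter p).count x : Int) = if p x then 1 else 0 := by
      by_cases h : p x
      · rw [List.count_filter h, List.count_eq_one_of_mem hd hxd]; simp [h]
      · rw [List.count_eq_zero_of_not_mem (by simp [List.mem_filter, h])]; simp [h]
    rw [hstep, hrec, sum_indicator, hcnt, List.countP_cons]
    by_cases h : p x <;> simp [h]

theorem count_letter_number_spec : Claim_equal_count_letter_number := by
  intro s _
  unfold Spec_count_letter_number count_letter_number count_letter_number_alt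
  set xs := s.toList with hxs
  rw [PySem.Dict.foldl_insert_getD_add_one_eq_counter]
  rw [foldA]
  have hnd : (PySem.Set.ofList xs).Nodup := PySem.Set.nodup_ofList xs
  have hsub : ∀ x ∈ xs, x ∈ PySem.Set.ofList xs := fun x hx => (PySem.Set.mem_ofList xs x).2 hx
  have hside : ∀ p : Char → Bool,
      (((PySem.Dict.counter xs).items.filter (fun kv => p kv.1)).map (fun kv => kv.2)).sum
        = (xs.countP p : Int) := by
    intro p
    rw [PySem.Dict.items_counter, List.filter_map, List.map_map]
    exact key_sum p (PySem.Set.ofList xs) hnd xs hsub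
  have h1 := hside (fun ch => decide (('a' ≤ ch ∧ ch ≤ 'z') ∨ ('A' ≤ ch ∧ ch ≤ 'Z')))
  have h2 := hside (fun ch => decide ('0' ≤ ch ∧ ch ≤ '9'))
  simp only [zero_add]
  rw [h1, h2]
  unfold pvL pvD
  rfl
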